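-- pv_equiv track=rewrite | github.com/NotSaminnn/BVP_Layer_01 | core/modules/vlm/vision_chat.py | _is_object_match
-- ===== SOURCE A (Python) =====
-- def _is_object_match(query_obj: str, class_name: str) -> bool:
--     """Check if query object matches class name with common variations"""
--     # Common object name mappings
--     object_mappings = {
--         'flower': ['flower', 'flowers', 'plant', 'plants', 'vase', 'vases'],
--         'tv': ['tv', 'television', 'screen', 'monitor', 'display'],
--         'fan': ['fan', 'ceiling fan', 'ventilator'],
--         'cabinet': ['cabinet', 'shelf', 'shelves', 'cupboard', 'storage'],
--         'laptop': ['laptop', 'computer', 'notebook', 'pc'],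
--         'phone': ['phone', 'mobile', 'cellphone', 'smartphone'],
--         'mug': ['mug', 'cup', 'coffee cup', 'drinking vessel'],
--         'pen': ['pen', 'pencil', 'writing instrument'],
--         'book': ['book', 'books', 'novel', 'magazine'],
--         'chair': ['chair', 'seat', 'stool'],
--         'table': ['table', 'desk', 'surface'],
--         'car': ['car', 'vehicle', 'automobile', 'auto'],
--         'person': ['person', 'people', 'human', 'man', 'woman', 'child']
--     }
--
--     # Check if query object is in any mapping group
--     for key, variations in object_mappings.items():
--         if query_obj in variations and class_name in variations:
--             return True
--
--     return False
-- ===== SOURCE B (Python) =====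
-- _GROUPS = [
--     "flower,flowers,plant,plants,vase,vases",
--     "tv,television,screen,monitor,display",
--     "fan,ceiling fan,ventilator",
--     "cabinet,shelf,shelves,cupboard,storage",
--     "laptop,computer,notebook,pc",
--     "phone,mobile,cellphone,smartphone",
--     "mug,cup,coffee cup,drinking vessel",
--     "pen,pencil,writing instrument",
--     "book,books,novel,magazine",
--     "chair,seat,stool",
--     "table,desk,surface",
--     "car,vehicle,automobile,auto",
--     "person,people,human,man,woman,child",
-- ]
-- # Reverse index built once: variation word -> synonym-group id (words are unique across groups)
-- _INDEX = {w: i for i, g in enumerate(_GROUPS) for w in g.split(",")}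
--
--
-- def _is_object_match(query_obj: str, class_name: str) -> bool:
--     """Check if query object matches class name with common variations"""
--     i = _INDEX.get(query_obj)
--     return i is not None and i == _INDEX.get(class_name)
-- ===== Notes on version B (the rewrite author's own statement) =====
-- stated objective: idiomatic
-- what changed: Stores the synonym groups as comma-separated strings, builds a reverse index (word -> group id) once at module load, and answers each query by comparing two direct lookups instead of A's per-call scan over all groups testing both memberships; correct because every variation word occurs in exactly one group.
import Mathlib
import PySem

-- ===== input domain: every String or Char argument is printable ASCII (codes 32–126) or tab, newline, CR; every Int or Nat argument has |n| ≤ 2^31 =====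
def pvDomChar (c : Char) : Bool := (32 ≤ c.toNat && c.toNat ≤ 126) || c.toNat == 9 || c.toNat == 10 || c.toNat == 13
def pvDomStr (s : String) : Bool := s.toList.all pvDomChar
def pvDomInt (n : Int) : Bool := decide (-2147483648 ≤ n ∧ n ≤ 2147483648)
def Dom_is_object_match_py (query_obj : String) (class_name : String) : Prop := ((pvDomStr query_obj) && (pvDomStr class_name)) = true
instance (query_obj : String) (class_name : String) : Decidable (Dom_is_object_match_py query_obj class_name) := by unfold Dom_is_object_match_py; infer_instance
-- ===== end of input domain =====

-- B stores the synonym groups as comma-separated strings, builds a reverse index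
-- (word -> group id) once, and compares two direct lookups, instead of A's scan over
-- all groups testing both memberships (objective: idiomatic).

-- ===== PORT A =====
-- A's literal table object_mappings, in source order
def pvGroups : List (String × List String) :=
  [ ("flower", ["flower", "flowers", "plant", "plants", "vase", "vases"]),
    ("tv", ["tv", "television", "screen", "monitor", "display"]),
    ("fan", ["fan", "ceiling fan", "ventilator"]),
    ("cabinet", ["cabinet", "shelf", "shelves", "cupboard", "storage"]),
    ("laptop", ["laptop", "computer", "notebook", "pc"]),
    ("phone", ["phone", "mobile", "cellphone", "smartphone"]),
    ("mug", ["mug", "cup", "coffee cup", "drinking vessel"]),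
    ("pen", ["pen", "pencil", "writing instrument"]),
    ("book", ["book", "books", "novel", "magazine"]),
    ("chair", ["chair", "seat", "stool"]),
    ("table", ["table", "desk", "surface"]),
    ("car", ["car", "vehicle", "automobile", "auto"]),
    ("person", ["person", "people", "human", "man", "woman", "child"]) ]

-- A's loop: for key, variations in object_mappings.items(): if q in variations and c in variations: return True
def pvScanA (q c : String) : List (String × List String) → Bool
  | [] => false
  | p :: rest => if p.2.contains q && p.2.contains c then true else pvScanA q c rest

def is_object_match_py (query_obj : String) (class_name : String) : Bool :=
  pvScanA query_obj class_name pvGroups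

-- ===== PORT B =====
-- _GROUPS: each synonym group as one comma-separated string
def pvGroupsB : List String :=
  [ "flower,flowers,plant,plants,vase,vases",
    "tv,television,screen,monitor,display",
    "fan,ceiling fan,ventilator",
    "cabinet,shelf,shelves,cupboard,storage",
    "laptop,computer,notebook,pc",
    "phone,mobile,cellphone,smartphone",
    "mug,cup,coffee cup,drinking vessel",
    "pen,pencil,writing instrument",
    "book,books,novel,magazine",
    "chair,seat,stool",
    "table,desk,surface",
    "car,vehicle,automobile,auto",
    "person,people,human,man,woman,child" ]

-- g.split(",") — the separator is the nonempty literal ",", so split? is always some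
def pvSplitComma (g : String) : List String := (PySem.Str.split? g ",").getD []

-- _INDEX = {w: i for i, g in enumerate(_GROUPS) for w in g.split(",")}
def pvIndexB : PySem.Dict String Int :=
  (PySem.List.enumerate pvGroupsB).foldl
    (fun d p => (pvSplitComma p.2).foldl (fun d w => d.insert w p.1) d)
    PySem.Dict.empty

-- i = _INDEX.get(query_obj); return i is not None and i == _INDEX.get(class_name)
def is_object_match_py_alt (query_obj : String) (class_name : String) : Bool :=
  match pvIndexB.get? query_obj with
  | none => false
  | some i => pvIndexB.get? class_name == some i

-- ===== PRECONDITION & SPEC =====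
def Spec_is_object_match_py (query_obj : String) (class_name : String) (out : Bool) : Prop := out = is_object_match_py_alt query_obj class_name
instance (query_obj : String) (class_name : String) (out : Bool) : Decidable (Spec_is_object_match_py query_obj class_name out) := by unfold Spec_is_object_match_py; infer_instance

-- ===== CLAIM =====
def Claim_equal_is_object_match_py : Prop := ∀ (query_obj : String) (class_name : String), Dom_is_object_match_py query_obj class_name → Spec_is_object_match_py query_obj class_name (is_object_match_py query_obj class_name)

-- ===== LEMMAS AND PROOFS =====

-- "both groups found and they carry the same tag"
def pvKeyMatch {κ : Type} [BEq κ] (o o' : Option (κ × List String)) : Bool :=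
  match o, o' with
  | some p, some p' => p.1 == p'.1
  | _, _ => false

-- B's groups, paired with their enumerate ids and split into word lists (proof-side view)
def pvGroupsB' : List (Int × List String) :=
  (PySem.List.enumerate pvGroupsB).map (fun p => (p.1, pvSplitComma p.2))

-- generic over the tag type κ carried by each group (String keys for A, Int ids for B)

-- inner comprehension pass: every word of vs is mapped to the same tag k
theorem pv_get_inner {κ : Type} (vs : List String) (k : κ) (w : String)
    (d : PySem.Dict String κ) :
    ((vs.foldl (fun d w' => d.insert w' k) d).get? w)
      = if vs.contains w then some k else d.get? w := by
  induction vs generalizing d with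
  | nil => simp
  | cons v rest ih =>
      simp only [List.foldl_cons, ih, PySem.Dict.get?_insert, List.contains_cons]
      by_cases hv : w = v <;> by_cases hr : rest.contains w = true <;>
        simp_all [beq_iff_eq]

def pvStep {κ : Type} (d : PySem.Dict String κ) (p : κ × List String) : PySem.Dict String κ :=
  p.2.foldl (fun d w => d.insert w p.1) d

-- a word occurring in no group of m is untouched by the index-building fold
theorem pv_get_fold_none {κ : Type} (m : List (κ × List String)) (w : String)
    (d : PySem.Dict String κ) (h : ∀ p ∈ m, p.2.contains w = false) :
    ((m.foldl pvStep d).get? w) = d.get? w := by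
  induction m generalizing d with
  | nil => rfl
  | cons p rest ih =>
      simp only [List.foldl_cons]
      rw [ih _ (fun p hp => h p (List.mem_cons_of_mem _ hp))]
      simp only [pvStep]
      rw [pv_get_inner, h p (List.mem_cons_self ..)]
      rfl

-- a word of group p occurs in no other group, given the global no-duplicates fact
theorem pv_not_in_rest {κ : Type} (p : κ × List String) (rest : List (κ × List String))
    (w : String)
    (hdisj : ∀ a ∈ p.2, ∀ b ∈ (rest.map (·.2)).flatten, a ≠ b)
    (hw : w ∈ p.2) : ∀ p' ∈ rest, p'.2.contains w = false := by
  intro p' hp'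
  rw [List.contains_eq_mem, decide_eq_false_iff_not]
  intro hmem
  exact hdisj w hw w (List.mem_flatten.mpr ⟨p'.2, List.mem_map_of_mem hp', hmem⟩) rfl

-- with pairwise-disjoint word lists, the index lookup is the FIRST group containing w
theorem pv_get_fold {κ : Type} (m : List (κ × List String)) (w : String)
    (d : PySem.Dict String κ) (h : (m.map (·.2)).flatten.Nodup) :
    ((m.foldl pvStep d).get? w)
      = match m.find? (fun p => p.2.contains w) with
        | some p => some p.1
        | none => d.get? w := by
  induction m generalizing d with
  | nil => rfl
  | cons p rest ih =>
      rw [List.map_cons, List.flatten_cons, List.nodup_append] at h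
      obtain ⟨h1, h2, hdisj⟩ := h
      by_cases hw : p.2.contains w = true
      · have hwmem : w ∈ p.2 := by simpa [List.contains_eq_mem] using hw
        rw [List.foldl_cons, pv_get_fold_none rest w _ (pv_not_in_rest p rest w hdisj hwmem),
            @List.find?_cons_of_pos _ (fun p => p.2.contains w) p rest hw]
        simp only [pvStep]
        rw [pv_get_inner, hw]
        simp
      · rw [List.foldl_cons, ih _ h2,
            @List.find?_cons_of_neg _ (fun p => p.2.contains w) p rest hw]
        cases hf : rest.find? (fun p => p.2.contains w) with
        | some q => simp
        | none =>
            simp only [pvStep]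
            rw [pv_get_inner, Bool.eq_false_iff.mpr hw]
            rfl

-- A's scan returns False when no group contains q (resp. c)
theorem pv_scan_false_q (m : List (String × List String)) (q c : String)
    (h : ∀ p ∈ m, p.2.contains q = false) : pvScanA q c m = false := by
  induction m with
  | nil => rfl
  | cons p rest ih =>
      rw [pvScanA, h p (List.mem_cons_self ..)]
      simpa using ih (fun p hp => h p (List.mem_cons_of_mem _ hp))

theorem pv_scan_false_c (m : List (String × List String)) (q c : String)
    (h : ∀ p ∈ m, p.2.contains c = false) : pvScanA q c m = false := by
  induction m with
  | nil => rfl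
  | cons p rest ih =>
      rw [pvScanA, h p (List.mem_cons_self ..)]
      simpa using ih (fun p hp => h p (List.mem_cons_of_mem _ hp))

-- A's scan equals "first group of q and first group of c exist and carry the same key"
theorem pv_scan_eq (m : List (String × List String)) (q c : String)
    (hw : (m.map (·.2)).flatten.Nodup) (hk : (m.map (·.1)).Nodup) :
    pvScanA q c m
      = pvKeyMatch (m.find? (fun p => p.2.contains q)) (m.find? (fun p => p.2.contains c)) := by
  simp only [pvKeyMatch]
  induction m with
  | nil => rfl
  | cons p rest ih =>
      rw [List.map_cons, List.flatten_cons, List.nodup_append] at hw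
      obtain ⟨h1, h2, hdisj⟩ := hw
      rw [List.map_cons, List.nodup_cons] at hk
      obtain ⟨hk1, hk2⟩ := hk
      have keyne : ∀ p' ∈ rest, (p.1 == p'.1) = false := by
        intro p' hp'
        rw [beq_eq_false_iff_ne]
        intro he
        exact hk1 (he ▸ List.mem_map_of_mem hp')
      by_cases hq : p.2.contains q = true <;> by_cases hc : p.2.contains c = true
      · rw [pvScanA, hq, hc, @List.find?_cons_of_pos _ (fun p => p.2.contains q) p rest hq,
            @List.find?_cons_of_pos _ (fun p => p.2.contains c) p rest hc]
        simp
      · have hqmem : q ∈ p.2 := by simpa [List.contains_eq_mem] using hq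
        rw [pvScanA, hq, Bool.eq_false_iff.mpr hc]
        rw [show (if (true && false : Bool) = true then true else pvScanA q c rest)
              = pvScanA q c rest by simp]
        rw [pv_scan_false_q rest q c (pv_not_in_rest p rest q hdisj hqmem),
            @List.find?_cons_of_pos _ (fun p => p.2.contains q) p rest hq,
            @List.find?_cons_of_neg _ (fun p => p.2.contains c) p rest hc]
        cases hf : rest.find? (fun p => p.2.contains c) with
        | none => rfl
        | some p' => simp [keyne p' (List.mem_of_find?_eq_some hf)]
      · have hcmem : c ∈ p.2 := by simpa [List.contains_eq_mem] using hc
        rw [pvScanA, hc, Bool.eq_false_iff.mpr hq]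
        rw [show (if (false && true : Bool) = true then true else pvScanA q c rest)
              = pvScanA q c rest by simp]
        rw [pv_scan_false_c rest q c (pv_not_in_rest p rest c hdisj hcmem),
            @List.find?_cons_of_neg _ (fun p => p.2.contains q) p rest hq,
            @List.find?_cons_of_pos _ (fun p => p.2.contains c) p rest hc]
        cases hf : rest.find? (fun p => p.2.contains q) with
        | none => rfl
        | some p' =>
            have h0 : (p'.1 == p.1) = false := by
              rw [beq_eq_false_iff_ne]
              exact fun he => (beq_eq_false_iff_ne.mp
                (keyne p' (List.mem_of_find?_eq_some hf))) he.symm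
            simp [h0]
      · rw [pvScanA, Bool.eq_false_iff.mpr hq, Bool.eq_false_iff.mpr hc]
        rw [show (if (false && false : Bool) = true then true else pvScanA q c rest)
              = pvScanA q c rest by simp]
        rw [@List.find?_cons_of_neg _ (fun p => p.2.contains q) p rest hq,
            @List.find?_cons_of_neg _ (fun p => p.2.contains c) p rest hc]
        exact ih h2 hk2

-- with distinct tags, "same tag of the first containing groups" is position equality:
-- the canonical form both programs reduce to
def pvCanon (gs : List (List String)) (q c : String) : Bool :=
  match gs.findIdx? (fun vs => vs.contains q), gs.findIdx? (fun vs => vs.contains c) with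
  | some i, some j => i == j
  | _, _ => false

theorem pv_find_canon {κ : Type} [BEq κ] [LawfulBEq κ]
    (m : List (κ × List String)) (hk : (m.map Prod.fst).Nodup) (q c : String) :
    pvKeyMatch (m.find? (fun p => p.2.contains q)) (m.find? (fun p => p.2.contains c))
    = pvCanon (m.map Prod.snd) q c := by
  simp only [pvKeyMatch]
  induction m with
  | nil => rfl
  | cons p rest ih =>
      rw [List.map_cons, List.nodup_cons] at hk
      obtain ⟨hk1, hk2⟩ := hk
      have keyne : ∀ p' ∈ rest, (p.1 == p'.1) = false := by
        intro p' hp'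
        rw [beq_eq_false_iff_ne]
        intro he
        exact hk1 (he ▸ List.mem_map_of_mem hp')
      simp only [pvCanon, List.map_cons, List.findIdx?_cons, List.findIdx?_map] at *
      by_cases hq : p.2.contains q = true <;> by_cases hc : p.2.contains c = true <;>
        simp only [hq, hc, Bool.false_eq_true, not_false_iff, if_true, if_false,
          List.find?_cons_of_pos, List.find?_cons_of_neg]
      · simp
      · cases hf : rest.find? (fun p => p.2.contains c) with
        | none =>
            cases hfi : rest.findIdx? ((fun vs => vs.contains c) ∘ Prod.snd) <;> simp
        | some p' =>
            cases hfi : rest.findIdx? ((fun vs => vs.contains c) ∘ Prod.snd) <;>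
              simp [keyne p' (List.mem_of_find?_eq_some hf)]
      · cases hf : rest.find? (fun p => p.2.contains q) with
        | none =>
            cases hfi : rest.findIdx? ((fun vs => vs.contains q) ∘ Prod.snd) <;> simp
        | some p' =>
            have h0 : (p'.1 == p.1) = false := by
              rw [beq_eq_false_iff_ne]
              exact fun he => (beq_eq_false_iff_ne.mp
                (keyne p' (List.mem_of_find?_eq_some hf))) he.symm
            cases hfi : rest.findIdx? ((fun vs => vs.contains q) ∘ Prod.snd) <;>
              simp [h0]
      · rw [ih hk2]
        cases rest.findIdx? ((fun vs => vs.contains q) ∘ Prod.snd) <;>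
          cases rest.findIdx? ((fun vs => vs.contains c) ∘ Prod.snd) <;> simp

-- B's index is the generic fold over the proof-side view of its groups
theorem pvIndexB_eq : pvIndexB = pvGroupsB'.foldl pvStep PySem.Dict.empty := by
  rw [pvGroupsB', List.foldl_map]
  rfl

-- the two tables carry the same word lists, in the same order
theorem pv_snd_eq : pvGroupsB'.map Prod.snd = pvGroups.map Prod.snd := by decide
theorem pv_groups_words_nodup : ((pvGroups.map (·.2)).flatten).Nodup := by decide
theorem pv_groups_keys_nodup : ((pvGroups.map (·.1))).Nodup := by decide
theorem pv_groupsB_ids_nodup : ((pvGroupsB'.map Prod.fst)).Nodup := by decide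

theorem pv_groupsB_words_nodup : ((pvGroupsB'.map (·.2)).flatten).Nodup := by
  have : (pvGroupsB'.map (·.2)) = (pvGroups.map (·.2)) := pv_snd_eq
  rw [this]; exact pv_groups_words_nodup

theorem pv_alt_eq (q c : String) :
    is_object_match_py_alt q c
      = pvKeyMatch (pvGroupsB'.find? (fun p => p.2.contains q))
                   (pvGroupsB'.find? (fun p => p.2.contains c)) := by
  simp only [pvKeyMatch]
  unfold is_object_match_py_alt
  rw [pvIndexB_eq,
      pv_get_fold pvGroupsB' q PySem.Dict.empty pv_groupsB_words_nodup,
      pv_get_fold pvGroupsB' c PySem.Dict.empty pv_groupsB_words_nodup]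
  cases pvGroupsB'.find? (fun p => p.2.contains q) <;>
    cases pvGroupsB'.find? (fun p => p.2.contains c) <;>
      simp [PySem.Dict.get?_empty, eq_comm]

-- ===== VERDICT =====
set_option maxRecDepth 8192 in
theorem is_object_match_py_spec : Claim_equal_is_object_match_py := by
  intro q c _
  show is_object_match_py q c = is_object_match_py_alt q c
  have h1 : is_object_match_py q c = pvCanon (pvGroups.map Prod.snd) q c :=
    (pv_scan_eq pvGroups q c pv_groups_words_nodup pv_groups_keys_nodup).trans
      (pv_find_canon pvGroups pv_groups_keys_nodup q c)
  have h2 : is_object_match_py_alt q c = pvCanon (pvGroupsB'.map Prod.snd) q c :=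
    (pv_alt_eq q c).trans (pv_find_canon pvGroupsB' pv_groupsB_ids_nodup q c)
  rw [h1, h2, pv_snd_eq]
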